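-- pv_equiv track=rewrite | github.com/osg-htc/networking | scripts/convert_admonition_fences.py | process
-- ===== SOURCE A (Python) =====
-- def process(lines):
--     out=[]
--     i=0
--     while i<len(lines):
--         l=lines[i]
--         if l.strip().startswith('!!!'):
--             out.append(l)
--             i+=1
--             # process inside admon until blank line or next '!!!' or heading
--             while i<len(lines) and not lines[i].startswith('!!!') and not lines[i].startswith('##'):
--                 if lines[i].strip()=="```text":
--                     i+=1
--                     # indent subsequent lines until closing fence
--                     while i<len(lines) and lines[i].strip()!="``":
--                         if lines[i].strip():
--                             out.append('    '+lines[i])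
--                         else:
--                             out.append(lines[i])
--                         i+=1
--                     # skip closing fence line
--                     if i<len(lines) and lines[i].strip()=="``":
--                         i+=1
--                         continue
--                 else:
--                     out.append(lines[i])
--                     i+=1
--         else:
--             out.append(l)
--             i+=1
--     return out
-- ===== SOURCE B (Python) =====
-- def process(lines):
--     # single-pass state machine over a line index: NORMAL / ADMON / FENCE
--     NORMAL, ADMON, FENCE = 0, 1, 2
--     out = []
--     state = NORMAL
--     i = 0
--     while i < len(lines):
--         l = lines[i]
--         if state == NORMAL:
--             out.append(l)
--             if l.strip().startswith('!!!'):
--                 state = ADMON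
--             i += 1
--         elif state == ADMON:
--             if l.startswith('!!!') or l.startswith('##'):
--                 state = NORMAL          # re-handle this line without advancing
--             elif l.strip() == '```text':
--                 state = FENCE
--                 i += 1
--             else:
--                 out.append(l)
--                 i += 1
--         else:  # FENCE
--             if l.strip() == '``':
--                 state = ADMON           # skip closing fence line
--             else:
--                 out.append('    ' + l if l.strip() else l)
--             i += 1
--     return out
-- ===== Notes on version B (the rewrite author's own statement) =====
-- stated objective: alternative
-- what changed: Replaced A's three nested while-loops sharing one index with a single flat pass driven by an explicit NORMAL/ADMON/FENCE state variable, accumulating output in one place.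
import Mathlib
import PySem

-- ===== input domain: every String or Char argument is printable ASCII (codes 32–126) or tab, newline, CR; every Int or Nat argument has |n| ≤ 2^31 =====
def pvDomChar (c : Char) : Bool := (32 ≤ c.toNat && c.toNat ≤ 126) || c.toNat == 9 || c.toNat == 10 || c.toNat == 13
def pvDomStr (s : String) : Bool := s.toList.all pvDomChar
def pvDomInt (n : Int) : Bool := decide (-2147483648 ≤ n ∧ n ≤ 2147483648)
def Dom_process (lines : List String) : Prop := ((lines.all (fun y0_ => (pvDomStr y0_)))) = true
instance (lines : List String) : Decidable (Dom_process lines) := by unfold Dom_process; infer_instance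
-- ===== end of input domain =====

-- B rewrites A's three nested while-loops as one flat state-machine pass (same O(n) cost).

-- ===== PORT A =====
-- A's outer while / inner admonition while / innermost fence while, each as its own recursion.
mutual
def outerA : List String → List String
  | [] => []
  | l :: rest =>
    if PySem.Str.startswith (PySem.Str.strip l) "!!!" then l :: admonA rest
    else l :: outerA rest
termination_by ls => 2 * ls.length
def admonA : List String → List String
  | [] => []
  | l :: rest =>
    if PySem.Str.startswith l "!!!" || PySem.Str.startswith l "##" then outerA (l :: rest)
    else if PySem.Str.strip l = "```text" then fenceA rest
    else l :: admonA rest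
termination_by ls => 2 * ls.length + 1
def fenceA : List String → List String
  | [] => []
  | l :: rest =>
    if PySem.Str.strip l = "``" then admonA rest
    else (if PySem.Str.strip l ≠ "" then "    " ++ l else l) :: fenceA rest
termination_by ls => 2 * ls.length + 1
end

def process (lines : List String) : List String := outerA lines

-- ===== PORT B =====
-- single pass, state 0 = NORMAL, 1 = ADMON, 2 = FENCE, output accumulated in `out`
def goB : Nat → List String → List String → List String
  | _, out, [] => out
  | state, out, l :: rest =>
    if state = 0 then
      goB (if PySem.Str.startswith (PySem.Str.strip l) "!!!" then 1 else 0) (out ++ [l]) rest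
    else if state = 1 then
      if PySem.Str.startswith l "!!!" || PySem.Str.startswith l "##" then goB 0 out (l :: rest)
      else if PySem.Str.strip l = "```text" then goB 2 out rest
      else goB 1 (out ++ [l]) rest
    else
      if PySem.Str.strip l = "``" then goB 1 out rest
      else goB 2 (out ++ [if PySem.Str.strip l ≠ "" then "    " ++ l else l]) rest
termination_by state _ ls => 2 * ls.length + (if state = 0 then 0 else 1)
decreasing_by all_goals (simp only [List.length_cons]; split_ifs <;> omega)

def process_alt (lines : List String) : List String := goB 0 [] lines

-- ===== PRECONDITION & SPEC =====
def Spec_process (lines : List String) (out : List String) : Prop := out = process_alt lines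
instance (lines : List String) (out : List String) : Decidable (Spec_process lines out) := by unfold Spec_process; infer_instance

-- ===== CLAIM (what is proved, stated in full; the proofs are below) =====
def Claim_equal_process : Prop := ∀ (lines : List String), Dom_process lines → Spec_process lines (process lines)

-- ===== LEMMAS AND PROOFS =====
theorem goB_eq (state : Nat) (out ls : List String) :
    goB state out ls =
      out ++ (if state = 0 then outerA ls else if state = 1 then admonA ls else fenceA ls) := by
  induction state, out, ls using goB.induct with
  | case1 x out => simp [goB, outerA, admonA, fenceA]
  | case2 out l rest ih =>
    rw [goB.eq_2]
    by_cases hs : PySem.Str.startswith (PySem.Str.strip l) "!!!" = true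
    · simp only [hs] at ih ⊢
      simp at ih
      simp at hs
      simp [ih]
      rw [outerA.eq_2]
      simp [hs]
    · simp only [hs] at ih ⊢
      simp at ih
      simp at hs
      simp [ih]
      rw [outerA.eq_2]
      simp [hs]
  | case3 out l rest h hne ih =>
    rw [goB.eq_2]
    simp [ih, admonA]
    split_ifs <;> simp_all
  | case4 out l rest h hf hne ih =>
    rw [goB.eq_2]
    simp at ih
    simp [hf, ih, admonA]
    split_ifs <;> simp_all
  | case5 out l rest h hf hne ih =>
    rw [goB.eq_2]
    simp at ih
    simp [hf, ih, admonA]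
    split_ifs <;> simp_all
  | case6 state out l rest h0 h1 hc ih =>
    rw [goB.eq_2]
    simp at ih
    simp [h0, h1, hc, ih, fenceA]
  | case7 state out l rest h0 h1 hc ih =>
    rw [goB.eq_2]
    simp at ih
    simp [h0, h1, hc, ih, fenceA]

-- ===== VERDICT (by name: the statement is the Claim_ definition above) =====
theorem process_spec : Claim_equal_process := by
  intro lines _
  unfold Spec_process process process_alt
  simp [goB_eq]
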